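-- pv_equiv track=rewrite | github.com/mhedenus/rdf2graphml | src/rdf2graphml/converter.py | _generate_unique_attr_names
-- ===== SOURCE A (Python) =====
-- from typing import Set, Dict, List, Tuple, Any, Optional
--
-- def _generate_unique_attr_names(uris: Set[str]) -> Dict[str, str]:
--     used_names: Dict[str, int] = {}
--     mapping: Dict[str, str] = {}
--     for uri in sorted(uris):
--         base_name = str(uri).split("/")[-1].split("#")[-1] or "attr"
--         if base_name not in used_names:
--             used_names[base_name] = 1
--             mapping[uri] = base_name
--         else:
--             mapping[uri] = f"{base_name} ({used_names[base_name]})"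
--             used_names[base_name] += 1
--     return mapping
-- ===== SOURCE B (Python) =====
-- from typing import Set, Dict, List, Tuple, Any, Optional
--
--
-- def _generate_unique_attr_names(uris: Set[str]) -> Dict[str, str]:
--     # Group-then-assign decomposition: bucket the sorted uris by base name,
--     # name each bucket member by its index in the bucket, then assemble the
--     # mapping keyed in sorted order.
--     ordered = sorted(uris)
--     groups: Dict[str, List[str]] = {}
--     for uri in ordered:
--         base = str(uri).split("/")[-1].split("#")[-1] or "attr"
--         groups.setdefault(base, []).append(uri)
--     names: Dict[str, str] = {}
--     for base, group in groups.items():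
--         for i, uri in enumerate(group):
--             names[uri] = base if i == 0 else f"{base} ({i})"
--     return {uri: names[uri] for uri in ordered}
-- ===== Notes on version B (the rewrite author's own statement) =====
-- stated objective: alternative
-- what changed: Replaces the single pass with a running used_names counter by a group-then-assign decomposition: bucket the sorted uris into a dict keyed by base name, name each bucket member by its enumerate index within its bucket, then assemble the result dict in sorted order.
import Mathlib
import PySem

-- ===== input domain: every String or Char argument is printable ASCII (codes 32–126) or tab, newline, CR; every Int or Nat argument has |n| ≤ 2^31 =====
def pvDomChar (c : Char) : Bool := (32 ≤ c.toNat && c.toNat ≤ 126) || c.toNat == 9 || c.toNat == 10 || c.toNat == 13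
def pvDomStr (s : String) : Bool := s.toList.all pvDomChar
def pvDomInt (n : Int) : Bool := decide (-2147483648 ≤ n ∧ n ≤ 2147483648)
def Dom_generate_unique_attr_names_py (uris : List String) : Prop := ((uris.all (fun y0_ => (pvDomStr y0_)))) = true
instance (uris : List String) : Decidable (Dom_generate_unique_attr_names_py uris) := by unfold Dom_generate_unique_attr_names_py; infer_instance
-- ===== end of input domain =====

-- B replaces A's running used_names counter with a group-then-assign decomposition
-- (bucket sorted uris by base name, name by in-bucket index, assemble in sorted order);
-- same cost class, different structure.


-- ===== PORT A =====
-- str(uri).split("/")[-1].split("#")[-1] or "attr"  (split? is some because the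
-- separators are nonempty; [-1] via getLastD — the piece list is never empty)
def generate_unique_attr_names_py (uris : List String) : List (String × String) :=
  let step : (PySem.Dict String Int × PySem.Dict String String) → String →
      (PySem.Dict String Int × PySem.Dict String String) := fun st uri =>
    let base_name :=
      let t := (((PySem.Str.split? (((PySem.Str.split? uri "/").getD []).getLastD "") "#").getD []).getLastD "")
      if t = "" then "attr" else t
    match st.1.get? base_name with
    | none => (st.1.insert base_name 1, st.2.insert uri base_name)
    | some c => (st.1.insert base_name (c + 1),
                 st.2.insert uri (base_name ++ " (" ++ PySem.Int.toStr c ++ ")"))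
  ((PySem.List.sorted uris (fun x => x) false).foldl step
    (PySem.Dict.empty, PySem.Dict.empty)).2.items

-- ===== PORT B =====
def base_name_alt (uri : String) : String :=
  let t := (((PySem.Str.split? (((PySem.Str.split? uri "/").getD []).getLastD "") "#").getD []).getLastD "")
  if t = "" then "attr" else t

-- names[uri] in the final comprehension: the key is always present (every uri of
-- `ordered` was appended to its bucket), so get? is some and getD "" is exact.
def generate_unique_attr_names_py_alt (uris : List String) : List (String × String) :=
  let ordered := PySem.List.sorted uris (fun x => x) false
  let groups := ordered.foldl
    (fun g u => g.modify (base_name_alt u) [] (· ++ [u])) PySem.Dict.empty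
  let names := groups.items.foldl
    (fun nm p =>
      (PySem.List.enumerate p.2 0).foldl
        (fun nm q =>
          nm.insert q.2 (if q.1 = 0 then p.1 else p.1 ++ " (" ++ PySem.Int.toStr q.1 ++ ")")) nm)
    PySem.Dict.empty
  (ordered.foldl (fun mp u => mp.insert u ((names.get? u).getD "")) PySem.Dict.empty).items

-- ===== PRECONDITION & SPEC =====
-- The Python parameter is a Set[str]; its List encoding holds the set's distinct
-- elements, so lists with duplicate elements correspond to no Python input and are excluded.
def Pre_generate_unique_attr_names_py (uris : List String) : Prop := uris.Nodup
instance (uris : List String) : Decidable (Pre_generate_unique_attr_names_py uris) := by unfold Pre_generate_unique_attr_names_py; infer_instance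
def pvWitness_generate_unique_attr_names_py : List String := ["a/x", "b/x", "p#q"]
def Spec_generate_unique_attr_names_py (uris : List String) (out : List (String × String)) : Prop := out = generate_unique_attr_names_py_alt uris
instance (uris : List String) (out : List (String × String)) : Decidable (Spec_generate_unique_attr_names_py uris out) := by unfold Spec_generate_unique_attr_names_py; infer_instance

-- ===== CLAIM (what is proved, stated in full; the proofs are below) =====
def Claim_equal_generate_unique_attr_names_py : Prop := ∀ (uris : List String), Dom_generate_unique_attr_names_py uris → Pre_generate_unique_attr_names_py uris → Spec_generate_unique_attr_names_py uris (generate_unique_attr_names_py uris)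

-- ===== LEMMAS AND PROOFS =====

-- the name given to the occurrence with in-bucket index i
def pvName (b : String) (i : Int) : String :=
  if i = 0 then b else b ++ " (" ++ PySem.Int.toStr i ++ ")"

-- the name A assigns to u when the already-processed elements are `pre`
def pvNameAt (pre : List String) (u : String) : String :=
  pvName (base_name_alt u) (((pre.map base_name_alt).count (base_name_alt u) : Nat) : Int)

-- reference association list: process `rest` after `pre`
def pvRef : List String → List String → List (String × String)
  | _, [] => []
  | pre, u :: rest => (u, pvNameAt pre u) :: pvRef (pre ++ [u]) rest

-- A's loop step, as a named function (definitionally the step in generate_unique_attr_names_py)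
def pvStepA : (PySem.Dict String Int × PySem.Dict String String) → String →
    (PySem.Dict String Int × PySem.Dict String String) := fun st uri =>
  let base_name := base_name_alt uri
  match st.1.get? base_name with
  | none => (st.1.insert base_name 1, st.2.insert uri base_name)
  | some c => (st.1.insert base_name (c + 1),
               st.2.insert uri (base_name ++ " (" ++ PySem.Int.toStr c ++ ")"))

-- B's buckets and its inner naming fold, as named functions
def pvGroups (L : List String) : PySem.Dict String (List String) :=
  L.foldl (fun g u => g.modify (base_name_alt u) [] (· ++ [u])) PySem.Dict.empty

def pvInner (grp : List String) (k : Int) (nm : PySem.Dict String String) (b : String) :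
    PySem.Dict String String :=
  (PySem.List.enumerate grp k).foldl (fun nm q => nm.insert q.2 (pvName b q.1)) nm

def pvNames (L : List String) : PySem.Dict String String :=
  (pvGroups L).items.foldl (fun nm p => pvInner p.2 0 nm p.1) PySem.Dict.empty

theorem pv_count_snoc (pre : List String) (u b' : String) :
    ((pre ++ [u]).map base_name_alt).count b'
      = (pre.map base_name_alt).count b' + (if base_name_alt u = b' then 1 else 0) := by
  simp [List.count_append, List.count_singleton]

-- A's fold appends exactly the reference list to the mapping's items
theorem pv_itemsA (rest : List String) : ∀ (pre : List String)
    (un : PySem.Dict String Int) (mp : PySem.Dict String String),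
    (∀ b, un.get? b =
      (if (pre.map base_name_alt).count b = 0 then none
       else some (((pre.map base_name_alt).count b : Nat) : Int))) →
    (∀ u ∈ rest, mp.contains u = false) →
    rest.Nodup →
    (rest.foldl pvStepA (un, mp)).2.items = mp.items ++ pvRef pre rest := by
  induction rest with
  | nil => intro pre un mp _ _ _; simp [pvRef]
  | cons u rest ih =>
    intro pre un mp hun hmp hnd
    have hstep := hun (base_name_alt u)
    have hfresh : mp.contains u = false := hmp u (by simp)
    have hmp' : ∀ v (u' : String), u' ∈ rest → (mp.insert u v).contains u' = false := by
      intro v u' hu'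
      rw [PySem.Dict.contains_insert]
      have hne : u' ≠ u := fun h => (List.nodup_cons.mp hnd).1 (h ▸ hu')
      simp [hne, hmp u' (List.mem_cons_of_mem _ hu')]
    have hndr : rest.Nodup := (List.nodup_cons.mp hnd).2
    rw [List.foldl_cons]
    by_cases hc : (pre.map base_name_alt).count (base_name_alt u) = 0
    · rw [if_pos hc] at hstep
      have hA : pvStepA (un, mp) u
          = (un.insert (base_name_alt u) 1, mp.insert u (base_name_alt u)) := by
        simp [pvStepA, hstep]
      rw [hA, ih (pre ++ [u]) _ _ (by
          intro b'
          rw [PySem.Dict.get?_insert, pv_count_snoc]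
          by_cases hb' : b' = base_name_alt u
          · subst hb'; rw [if_pos rfl, if_pos rfl, hc]; simp
          · rw [if_neg hb']
            have h0 : (if base_name_alt u = b' then 1 else 0) = 0 :=
              if_neg (fun h => hb' h.symm)
            rw [h0, Nat.add_zero]
            exact hun b')
        (hmp' _) hndr]
      rw [PySem.Dict.items_insert_of_not_contains _ _ hfresh]
      have hv : pvNameAt pre u = base_name_alt u := by
        simp [pvNameAt, pvName, hc]
      simp [pvRef, hv]
    · rw [if_neg hc] at hstep
      have hA : pvStepA (un, mp) u
          = (un.insert (base_name_alt u)
               ((((pre.map base_name_alt).count (base_name_alt u) : Nat) : Int) + 1),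
             mp.insert u ((base_name_alt u) ++ " (" ++
               PySem.Int.toStr (((pre.map base_name_alt).count (base_name_alt u) : Nat) : Int) ++ ")")) := by
        simp [pvStepA, hstep]
      rw [hA, ih (pre ++ [u]) _ _ (by
          intro b'
          rw [PySem.Dict.get?_insert, pv_count_snoc]
          by_cases hb' : b' = base_name_alt u
          · subst hb'; rw [if_pos rfl, if_pos rfl]; simp
          · rw [if_neg hb']
            have h0 : (if base_name_alt u = b' then 1 else 0) = 0 :=
              if_neg (fun h => hb' h.symm)
            rw [h0, Nat.add_zero]
            exact hun b')
        (hmp' _) hndr]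
      rw [PySem.Dict.items_insert_of_not_contains _ _ hfresh]
      have hv : pvNameAt pre u = (base_name_alt u) ++ " (" ++
          PySem.Int.toStr (((pre.map base_name_alt).count (base_name_alt u) : Nat) : Int) ++ ")" := by
        have h0 : (((pre.map base_name_alt).count (base_name_alt u) : Nat) : Int) ≠ 0 := by
          exact_mod_cast hc
        simp only [pvNameAt, pvName]
        rw [if_neg h0]
      simp [pvRef, hv]

-- bucket contents: group b holds, in order, the uris whose base name is b
theorem pv_groups_getD (L : List String) (b : String) :
    (pvGroups L).getD b [] = L.filter (fun u => base_name_alt u == b) := by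
  have h : pvGroups L
      = (L.map (fun u => (base_name_alt u, u))).foldl
          (fun d p => d.modify p.1 [] (· ++ [p.2])) PySem.Dict.empty := by
    rw [List.foldl_map]
    rfl
  rw [h, PySem.Dict.getD_foldl_modify_append, List.filter_map]
  simp [Function.comp_def]

theorem pv_groups_keys (L : List String) :
    (pvGroups L).keys = PySem.Set.ofList (L.map base_name_alt) := by
  rw [pvGroups, PySem.Dict.keys_foldl_modify_key]
  simp [PySem.Set.update_nil_left]

theorem pv_groups_items (L : List String) :
    (pvGroups L).items = (PySem.Set.ofList (L.map base_name_alt)).map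
      (fun b => (b, L.filter (fun u => base_name_alt u == b))) := by
  have hnd : (pvGroups L).keys.Nodup := by
    rw [pv_groups_keys]; exact PySem.Set.nodup_ofList _
  rw [PySem.Dict.items_eq_map_keys _ hnd [], pv_groups_keys]
  exact List.map_congr_left (fun b _ => by rw [pv_groups_getD])

-- inner naming fold: untouched keys keep their binding
theorem pv_inner_skip (grp : List String) : ∀ (k : Int) (nm : PySem.Dict String String)
    (b u : String), u ∉ grp → (pvInner grp k nm b).get? u = nm.get? u := by
  induction grp with
  | nil => intro k nm b u _; simp [pvInner]
  | cons v grp ih =>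
    intro k nm b u hu
    rw [pvInner, PySem.List.enumerate_cons, List.foldl_cons]
    have h := ih (k + 1) (nm.insert v (pvName b k)) b u (fun h => hu (List.mem_cons_of_mem _ h))
    rw [pvInner] at h
    rw [h]
    exact PySem.Dict.get?_insert_of_ne _ _ (fun he => hu (by rw [he]; exact List.mem_cons_self))

-- inner naming fold: a bucket member gets the name of its in-bucket index
theorem pv_inner_mem (grp : List String) : ∀ (k : Int) (nm : PySem.Dict String String)
    (b u : String), grp.Nodup → u ∈ grp →
    (pvInner grp k nm b).get? u = some (pvName b (k + (grp.idxOf u : Int))) := by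
  induction grp with
  | nil => intro k nm b u _ h; simp at h
  | cons v grp ih =>
    intro k nm b u hnd hu
    rw [pvInner, PySem.List.enumerate_cons, List.foldl_cons]
    by_cases hv : u = v
    · subst hv
      have hnotin : u ∉ grp := (List.nodup_cons.mp hnd).1
      rw [show ((PySem.List.enumerate grp (k + 1)).foldl
            (fun nm q => nm.insert q.2 (pvName b q.1)) (nm.insert u (pvName b k)))
          = pvInner grp (k + 1) (nm.insert u (pvName b k)) b from rfl,
        pv_inner_skip _ _ _ _ _ hnotin, PySem.Dict.get?_insert_self]
      simp
    · have hu' : u ∈ grp := by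
        rcases List.mem_cons.mp hu with h | h
        · exact absurd h hv
        · exact h
      rw [show ((PySem.List.enumerate grp (k + 1)).foldl
            (fun nm q => nm.insert q.2 (pvName b q.1)) (nm.insert v (pvName b k)))
          = pvInner grp (k + 1) (nm.insert v (pvName b k)) b from rfl,
        ih (k + 1) _ b u (List.nodup_cons.mp hnd).2 hu']
      have hvb : (v == u) = false := beq_eq_false_iff_ne.mpr (fun h => hv h.symm)
      have hidx : (v :: grp).idxOf u = grp.idxOf u + 1 := by
        simp [List.idxOf_cons, hvb]
      rw [hidx]
      have harith : k + 1 + ((grp.idxOf u : Nat) : Int)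
          = k + (((grp.idxOf u + 1 : Nat)) : Int) := by push_cast; ring
      rw [harith]

-- outer fold over buckets whose base names all differ from u's: u keeps its binding
theorem pv_outer_skip (L : List String) (bs : List String) :
    ∀ (nm : PySem.Dict String String) (u : String), (∀ b ∈ bs, base_name_alt u ≠ b) →
    ((bs.map (fun b => (b, L.filter (fun x => base_name_alt x == b)))).foldl
      (fun nm p => pvInner p.2 0 nm p.1) nm).get? u = nm.get? u := by
  induction bs with
  | nil => intro nm u _; simp
  | cons b bs ih =>
    intro nm u hb
    rw [List.map_cons, List.foldl_cons,
      ih _ u (fun b' hb' => hb b' (List.mem_cons_of_mem _ hb')),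
      pv_inner_skip]
    intro hu
    exact hb b List.mem_cons_self (by simpa using (List.mem_filter.mp hu).2)

-- the names dict maps each uri to the name of its index inside its bucket
theorem pv_names_fold (L : List String) (bs : List String) :
    ∀ (nm : PySem.Dict String String) (u : String), bs.Nodup → L.Nodup → u ∈ L →
    base_name_alt u ∈ bs →
    ((bs.map (fun b => (b, L.filter (fun x => base_name_alt x == b)))).foldl
      (fun nm p => pvInner p.2 0 nm p.1) nm).get? u
      = some (pvName (base_name_alt u)
          (((L.filter (fun x => base_name_alt x == base_name_alt u)).idxOf u : Nat) : Int)) := by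
  induction bs with
  | nil => intro nm u _ _ _ h; simp at h
  | cons b bs ih =>
    intro nm u hbnd hLnd huL hub
    rw [List.map_cons, List.foldl_cons]
    by_cases hb : base_name_alt u = b
    · subst hb
      have hmem : u ∈ L.filter (fun x => base_name_alt x == base_name_alt u) := by
        simp [List.mem_filter, huL]
      rw [pv_outer_skip L bs _ u (by
          intro b' hb' he
          exact (List.nodup_cons.mp hbnd).1 (he ▸ hb')),
        pv_inner_mem _ 0 nm _ u (hLnd.filter _) hmem]
      simp
    · have hub' : base_name_alt u ∈ bs := by
        rcases List.mem_cons.mp hub with h | h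
        · exact absurd h hb
        · exact h
      exact ih _ u (List.nodup_cons.mp hbnd).2 hLnd huL hub'

-- the final assembly pass lists sorted uris with their names
theorem pv_final_items (L : List String) (names : PySem.Dict String String)
    (hnd : L.Nodup) :
    (L.foldl (fun mp u => mp.insert u ((names.get? u).getD "")) PySem.Dict.empty).items
      = L.map (fun u => (u, (names.get? u).getD "")) := by
  have h := PySem.Dict.items_foldl_insert_fresh L (fun u => u)
    (fun u => ((names.get? u).getD "")) PySem.Dict.empty
    (by intro a _; simp) (by simpa using hnd)
  simpa using h

-- the names dict read on a member of L
theorem pv_names_get (L : List String) (u : String) (hnd : L.Nodup) (hu : u ∈ L) :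
    (pvNames L).get? u = some (pvName (base_name_alt u)
      (((L.filter (fun x => base_name_alt x == base_name_alt u)).idxOf u : Nat) : Int)) := by
  rw [pvNames, pv_groups_items]
  exact pv_names_fold L _ PySem.Dict.empty u (PySem.Set.nodup_ofList _) hnd hu
    (by rw [PySem.Set.mem_ofList]; exact List.mem_map_of_mem hu)

-- the in-bucket index of u equals A's running count when u is processed
theorem pv_idx_eq (pre suf : List String) (u : String)
    (hnd : (pre ++ u :: suf).Nodup) :
    pvName (base_name_alt u)
        ((((pre ++ u :: suf).filter (fun x => base_name_alt x == base_name_alt u)).idxOf u : Nat) : Int)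
      = pvNameAt pre u := by
  have hupre : u ∉ pre := by
    have := List.disjoint_of_nodup_append hnd
    exact fun hm => this hm (List.mem_cons_self)
  have hfil : (pre ++ u :: suf).filter (fun x => base_name_alt x == base_name_alt u)
      = pre.filter (fun x => base_name_alt x == base_name_alt u)
        ++ u :: suf.filter (fun x => base_name_alt x == base_name_alt u) := by
    rw [List.filter_append, List.filter_cons_of_pos (by simp)]
  have hnotf : u ∉ pre.filter (fun x => base_name_alt x == base_name_alt u) :=
    fun hm => hupre (List.mem_of_mem_filter hm)
  have hidx : ((pre ++ u :: suf).filter (fun x => base_name_alt x == base_name_alt u)).idxOf u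
      = (pre.filter (fun x => base_name_alt x == base_name_alt u)).length := by
    rw [hfil, List.idxOf_append, if_neg hnotf]
    simp
  have hcnt : (pre.map base_name_alt).count (base_name_alt u)
      = (pre.filter (fun x => base_name_alt x == base_name_alt u)).length := by
    rw [List.count, List.countP_map, List.countP_eq_length_filter]
    simp [Function.comp_def]
  rw [hidx, pvNameAt, hcnt]

theorem pv_map_ref (L : List String) (hnd : L.Nodup) : ∀ (rest pre : List String),
    pre ++ rest = L →
    rest.map (fun u => (u, ((pvNames L).get? u).getD "")) = pvRef pre rest := by
  intro rest
  induction rest with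
  | nil => intro pre _; simp [pvRef]
  | cons u rest ih =>
    intro pre hpre
    have huL : u ∈ L := hpre ▸ (List.mem_append_right pre (List.mem_cons_self))
    have hdec : (pre ++ u :: rest).Nodup := hpre ▸ hnd
    rw [List.map_cons, pvRef, ih (pre ++ [u]) (by rw [List.append_assoc]; simpa using hpre)]
    have hval : ((pvNames L).get? u).getD "" = pvNameAt pre u := by
      rw [pv_names_get L u hnd huL, Option.getD_some, ← hpre, pv_idx_eq pre rest u hdec]
    rw [hval]

-- ===== VERDICT (by name: the statement is the Claim_ definition above) =====
theorem generate_unique_attr_names_py_spec : Claim_equal_generate_unique_attr_names_py := by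
  intro uris _ hpre
  unfold Spec_generate_unique_attr_names_py
  show (generate_unique_attr_names_py uris) = _
  unfold generate_unique_attr_names_py generate_unique_attr_names_py_alt
  have hnd : (PySem.List.sorted uris (fun x => x) false).Nodup :=
    ((PySem.List.sorted_perm uris (fun x => x) false).symm).nodup hpre
  have hA := pv_itemsA (PySem.List.sorted uris (fun x => x) false) []
    PySem.Dict.empty PySem.Dict.empty
    (by intro b; simp [PySem.Dict.get?_empty])
    (by intro u _; simp [PySem.Dict.contains_empty]) hnd
  have hB : (generate_unique_attr_names_py_alt uris)
      = pvRef [] (PySem.List.sorted uris (fun x => x) false) := by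
    show ((PySem.List.sorted uris (fun x => x) false).foldl
        (fun mp u => mp.insert u (((pvNames (PySem.List.sorted uris (fun x => x) false)).get? u).getD ""))
        PySem.Dict.empty).items = _
    rw [pv_final_items _ _ hnd,
      pv_map_ref _ hnd (PySem.List.sorted uris (fun x => x) false) [] rfl]
  show ((PySem.List.sorted uris (fun x => x) false).foldl pvStepA
      (PySem.Dict.empty, PySem.Dict.empty)).2.items = _
  rw [hA]
  rw [show (PySem.Dict.empty : PySem.Dict String String).items = [] from rfl,
    List.nil_append]
  exact hB.symm
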